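-- pv_equiv track=rewrite | github.com/Launchpad5682/problem_solving | strings/day-2/mini-char-words.py | miniCharWords
-- ===== SOURCE A (Python) =====
-- def miniCharWords(arr):
--     dictionary = {}
--
--     # storing values
--     for i in arr:
--         dictionary[i] = {}
--         for j in i:
--             if dictionary[i].get(j, 'empty') == 'empty':
--                 dictionary[i][j] = 1
--                 continue
--
--             dictionary[i][j] = dictionary[i][j] + 1
--
--     # making counts
--     counts = {}
--
--     for i in dictionary:
--         for j in i:
--             if counts.get(j, 'empty') == 'empty':
--                 counts[j] = dictionary[i][j]
--                 continue
--
--             counts[j] = max(counts[j], dictionary[i][j])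
--
--     # returning array
--     arr = []
--
--     for i in counts:
--         for j in range(0, counts[i]):
--             arr.append(i)
--
--     return arr
-- ===== SOURCE B (Python) =====
-- def miniCharWords(arr):
--     # first-seen order of characters across all words
--     seen = []
--     for word in arr:
--         for ch in word:
--             if ch not in seen:
--                 seen.append(ch)
--     # for each character, its maximum count in any single word, emitted that many times
--     return [ch
--             for ch in seen
--             for _ in range(max((word.count(ch) for word in arr), default=0))]
-- ===== Notes on version B (the rewrite author's own statement) =====
-- stated objective: simpler
-- what changed: Replaces A's dict-of-per-word-counter-dicts plus a separate per-character maxima pass by a single ordered dedup of the characters and a closed-form per-character maximum of word.count(ch).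
import Mathlib
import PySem

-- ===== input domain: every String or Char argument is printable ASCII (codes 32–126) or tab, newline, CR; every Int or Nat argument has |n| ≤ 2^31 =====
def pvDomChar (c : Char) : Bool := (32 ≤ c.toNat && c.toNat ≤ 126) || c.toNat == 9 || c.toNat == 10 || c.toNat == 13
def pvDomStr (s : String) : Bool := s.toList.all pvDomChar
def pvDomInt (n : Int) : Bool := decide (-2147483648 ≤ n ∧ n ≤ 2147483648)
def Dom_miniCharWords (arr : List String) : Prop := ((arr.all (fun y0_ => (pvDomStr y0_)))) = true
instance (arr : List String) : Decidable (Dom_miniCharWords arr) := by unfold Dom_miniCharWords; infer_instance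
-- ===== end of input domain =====

-- B replaces A's dict-of-per-word-counter-dicts and its separate maxima pass by an ordered
-- dedup of the characters plus a closed-form per-character max of word.count(ch) (simpler).

-- ===== PORT A =====
-- characters are ported as Char (Python's 1-char strings); dictionary[i][j] is read with getD
-- (the key is always present there, so this is exact)
def miniCharWords (arr : List String) : List String :=
  let dictionary : PySem.Dict String (PySem.Dict Char Int) :=
    arr.foldl (fun dictionary i =>
      i.toList.foldl (fun dictionary j =>
        let inner := dictionary.getD i PySem.Dict.empty
        if inner.contains j = false then
          dictionary.insert i (inner.insert j 1)
        else
          dictionary.insert i (inner.insert j (inner.getD j 0 + 1)))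
        (dictionary.insert i PySem.Dict.empty))
      PySem.Dict.empty
  let counts : PySem.Dict Char Int :=
    dictionary.keys.foldl (fun counts i =>
      i.toList.foldl (fun counts j =>
        let v := (dictionary.getD i PySem.Dict.empty).getD j 0
        if counts.contains j = false then
          counts.insert j v
        else
          counts.insert j (max (counts.getD j 0) v))
        counts)
      PySem.Dict.empty
  counts.items.foldl (fun out p =>
    (PySem.List.pyRange 0 p.2 1).foldl (fun out _ => out ++ [String.singleton p.1]) out) []

-- ===== PORT B =====
-- 'if ch not in seen: seen.append(ch)' is PySem.Set.add; max(…, default=0) is PySem.List.maxD;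
-- word.count(ch) for a 1-char ch is the character count (exact)
def miniCharWords_alt (arr : List String) : List String :=
  let seen : PySem.Set Char :=
    arr.foldl (fun seen word => word.toList.foldl (fun seen ch => PySem.Set.add seen ch) seen)
      PySem.Set.empty
  seen.flatMap (fun ch =>
    (PySem.List.pyRange 0
        (PySem.List.maxD (arr.map fun word => ((word.toList.count ch : Nat) : Int)) (fun x => x) 0)
        1).map
      (fun _ => String.singleton ch))

-- ===== PRECONDITION & SPEC =====
def Spec_miniCharWords (arr : List String) (out : List String) : Prop := out = miniCharWords_alt arr
instance (arr : List String) (out : List String) : Decidable (Spec_miniCharWords arr out) := by unfold Spec_miniCharWords; infer_instance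

-- ===== CLAIM (what is proved, stated in full; the proofs are below) =====
def Claim_equal_miniCharWords : Prop := ∀ (arr : List String), Dom_miniCharWords arr → Spec_miniCharWords arr (miniCharWords arr)

-- ===== LEMMAS AND PROOFS =====

-- the count of character j in word w, as Python's int
def pvCnt (w : String) (j : Char) : Int := ((w.toList.count j : Nat) : Int)

-- the per-word counter built by A's first pass
def pvCI (w : String) : PySem.Dict Char Int :=
  w.toList.foldl (fun m j => m.insert j (m.getD j 0 + 1)) PySem.Dict.empty

-- A's second-pass inner loop, with the looked-up value generalised to a function g of the key
def pvFoldG (g : Char → Int) (c : PySem.Dict Char Int) (cs : List Char) : PySem.Dict Char Int :=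
  cs.foldl (fun c x =>
    if c.contains x = false then c.insert x (g x)
    else c.insert x (max (c.getD x 0) (g x))) c

-- max over all words of the count of k, base 0
def pvMaxOf (arr : List String) (k : Char) : Int :=
  (arr.map (fun w => pvCnt w k)).foldl max 0

-- the common normal form of both programs
def pvCanon (arr : List String) : List String :=
  (PySem.Set.ofList (arr.flatMap String.toList)).flatMap (fun k =>
    (PySem.List.pyRange 0 (pvMaxOf arr k) 1).map (fun _ => String.singleton k))

lemma store_inner (cs : List Char) (d : PySem.Dict String (PySem.Dict Char Int)) (i : String)
    (m : PySem.Dict Char Int) :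
    cs.foldl (fun dictionary j =>
        let inner := dictionary.getD i PySem.Dict.empty
        if inner.contains j = false then
          dictionary.insert i (inner.insert j 1)
        else
          dictionary.insert i (inner.insert j (inner.getD j 0 + 1)))
      (d.insert i m)
    = d.insert i (cs.foldl (fun m j => m.insert j (m.getD j 0 + 1)) m) := by
  induction cs generalizing m with
  | nil => rfl
  | cons a t ih =>
      simp only [List.foldl_cons]
      have hin : (d.insert i m).getD i PySem.Dict.empty = m := PySem.Dict.getD_insert_self ..
      by_cases h : m.contains a = false
      · simp only [hin, h, PySem.Dict.insert_insert_self,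
          PySem.Dict.getD_of_not_contains m 0 h]
        exact ih (m.insert a (0 + 1))
      · simp only [hin, h, PySem.Dict.insert_insert_self]
        simpa using ih (m.insert a (m.getD a 0 + 1))

lemma store_eq (arr : List String) :
    arr.foldl (fun dictionary i =>
      i.toList.foldl (fun dictionary j =>
        let inner := dictionary.getD i PySem.Dict.empty
        if inner.contains j = false then
          dictionary.insert i (inner.insert j 1)
        else
          dictionary.insert i (inner.insert j (inner.getD j 0 + 1)))
        (dictionary.insert i PySem.Dict.empty))
      PySem.Dict.empty
    = arr.foldl (fun d i => d.insert i (pvCI i)) PySem.Dict.empty := by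
  apply PySem.List.foldl_congr_mem
  intro d i _
  exact store_inner i.toList d i PySem.Dict.empty

lemma lookup_foldl_insert (g : String → PySem.Dict Char Int) (l : List String)
    (d0 : PySem.Dict String (PySem.Dict Char Int)) (k : String) :
    (l.foldl (fun d i => d.insert i (g i)) d0).getD k PySem.Dict.empty
    = if k ∈ l then g k else d0.getD k PySem.Dict.empty := by
  induction l generalizing d0 with
  | nil => simp
  | cons a t ih =>
      simp only [List.foldl_cons, ih, List.mem_cons]
      by_cases ht : k ∈ t
      · simp [ht]
      · by_cases hk : k = a
        · simp [hk, PySem.Dict.getD_insert_self]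
        · simp [ht, hk, PySem.Dict.getD_insert _ _ _ _ _]

lemma pvCI_getD (w : String) (j : Char) : (pvCI w).getD j 0 = pvCnt w j := by
  unfold pvCI pvCnt
  rw [PySem.Dict.getD_foldl_insert_add_one]
  simp

lemma foldG_step_form (g : Char → Int) :
    (fun (c : PySem.Dict Char Int) x =>
        if c.contains x = false then c.insert x (g x)
        else c.insert x (max (c.getD x 0) (g x)))
    = fun c x => c.insert x (if c.contains x = false then g x else max (c.getD x 0) (g x)) := by
  funext c x
  split <;> rfl

lemma foldG_keys (g : Char → Int) (c : PySem.Dict Char Int) (cs : List Char) :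
    (pvFoldG g c cs).keys = PySem.Set.update c.keys cs := by
  unfold pvFoldG
  rw [foldG_step_form]
  exact PySem.Dict.keys_foldl_insert cs _ c

lemma foldG_getD (cs : List Char) (g : Char → Int) (c : PySem.Dict Char Int) (j : Char)
    (hc : 0 ≤ c.getD j 0) (hg : ∀ x ∈ cs, 1 ≤ g x) :
    (pvFoldG g c cs).getD j 0
    = if j ∈ cs then max (c.getD j 0) (g j) else c.getD j 0 := by
  induction cs generalizing c with
  | nil => simp [pvFoldG]
  | cons a t ih =>
      have hstep : pvFoldG g c (a :: t)
          = pvFoldG g (if c.contains a = false then c.insert a (g a)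
                       else c.insert a (max (c.getD a 0) (g a))) t := by
        simp only [pvFoldG, List.foldl_cons]
      rw [hstep]
      have hga : 1 ≤ g a := hg a (by simp)
      have hgt : ∀ x ∈ t, 1 ≤ g x := fun x hx => hg x (by simp [hx])
      by_cases hca : c.contains a = false
      · have h0 : c.getD a 0 = 0 := PySem.Dict.getD_of_not_contains c 0 hca
        simp only [if_pos hca]
        have hc' : 0 ≤ (c.insert a (g a)).getD j 0 := by
          rw [PySem.Dict.getD_insert]
          split
          · omega
          · exact hc
        rw [ih _ hc' hgt]
        by_cases hja : j = a
        · subst hja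
          rw [PySem.Dict.getD_insert_self, h0]
          by_cases hjt : j ∈ t <;>
            simp [hjt, max_eq_right (show (0:ℤ) ≤ g j by omega)]
        · rw [PySem.Dict.getD_insert _ _ _ _ _, if_neg hja]
          by_cases hjt : j ∈ t <;> simp [hjt, hja]
      · simp only [if_neg hca]
        have hc' : 0 ≤ (c.insert a (max (c.getD a 0) (g a))).getD j 0 := by
          rw [PySem.Dict.getD_insert]
          split
          · exact le_max_of_le_right (by omega)
          · exact hc
        rw [ih _ hc' hgt]
        by_cases hja : j = a
        · subst hja
          rw [PySem.Dict.getD_insert_self]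
          by_cases hjt : j ∈ t
          · simp [hjt]
          · simp [hjt]
        · rw [PySem.Dict.getD_insert _ _ _ _ _, if_neg hja]
          by_cases hjt : j ∈ t <;> simp [hjt, hja]

lemma counts_getD (ws : List String) (c : PySem.Dict Char Int) (j : Char)
    (hc : 0 ≤ c.getD j 0) :
    (ws.foldl (fun c i => pvFoldG (pvCnt i) c i.toList) c).getD j 0
    = (ws.map (fun i => pvCnt i j)).foldl max (c.getD j 0) := by
  induction ws generalizing c with
  | nil => simp
  | cons a t ih =>
      have hg : ∀ x ∈ a.toList, 1 ≤ pvCnt a x := by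
        intro x hx
        have h := List.count_pos_iff.mpr hx
        unfold pvCnt
        exact_mod_cast h
      have hstep : (pvFoldG (pvCnt a) c a.toList).getD j 0 = max (c.getD j 0) (pvCnt a j) := by
        rw [foldG_getD a.toList (pvCnt a) c j hc hg]
        by_cases hj : j ∈ a.toList
        · simp [hj]
        · have h0 : pvCnt a j = 0 := by
            unfold pvCnt
            simp [List.count_eq_zero_of_not_mem hj]
          simp [hj, h0, max_eq_left hc]
      have hc' : 0 ≤ (pvFoldG (pvCnt a) c a.toList).getD j 0 := by
        rw [hstep]; exact le_max_of_le_left hc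
      simp only [List.foldl_cons, List.map_cons]
      rw [ih _ hc', hstep]

lemma counts_keys (ws : List String) (c : PySem.Dict Char Int) :
    (ws.foldl (fun c i => pvFoldG (pvCnt i) c i.toList) c).keys
    = PySem.Set.update c.keys (ws.flatMap String.toList) := by
  induction ws generalizing c with
  | nil => simp [PySem.Set.update_nil]
  | cons a t ih =>
      simp only [List.foldl_cons, List.flatMap_cons, PySem.Set.update_append, ih, foldG_keys]

lemma update_of_subset (s : PySem.Set Char) (xs : List Char) (h : ∀ x ∈ xs, x ∈ s) :
    PySem.Set.update s xs = s := by
  rw [PySem.Set.update_eq_append_filter]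
  have : List.filter (fun y => !s.contains y) (PySem.Set.ofList xs) = [] := by
    rw [List.filter_eq_nil_iff]
    intro y hy
    have hmem : y ∈ s := h y ((PySem.Set.mem_ofList xs y).mp hy)
    simp [PySem.Set.contains, hmem]
  rw [this, List.append_nil]

lemma ofList_flatMap_ofList (ws : List String) :
    PySem.Set.ofList ((PySem.Set.ofList ws).flatMap String.toList)
    = PySem.Set.ofList (ws.flatMap String.toList) := by
  induction ws using List.reverseRecOn with
  | nil => rfl
  | append_singleton l w ih =>
      have hofl : PySem.Set.ofList (l ++ [w]) = PySem.Set.add (PySem.Set.ofList l) w := by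
        rw [PySem.Set.ofList_append, PySem.Set.update_cons, PySem.Set.update_nil]
      by_cases hw : w ∈ l
      · have hadd : PySem.Set.add (PySem.Set.ofList l) w = PySem.Set.ofList l := by
          unfold PySem.Set.add
          have : (PySem.Set.ofList l).contains w = true := by
            simp [PySem.Set.contains, hw]
          rw [if_pos this]
        rw [hofl, hadd, ih, List.flatMap_append, List.flatMap_singleton,
          PySem.Set.ofList_append]
        exact (update_of_subset _ _ (fun x hx =>
          (PySem.Set.mem_ofList _ x).mpr (List.mem_flatMap.mpr ⟨w, hw, hx⟩))).symm
      · have hadd : PySem.Set.add (PySem.Set.ofList l) w = PySem.Set.ofList l ++ [w] := by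
          unfold PySem.Set.add
          rw [if_neg (by simp [PySem.Set.contains, hw])]
        rw [hofl, hadd, List.flatMap_append, List.flatMap_singleton,
          PySem.Set.ofList_append, ih, List.flatMap_append, List.flatMap_singleton,
          PySem.Set.ofList_append]

lemma foldl_max_ofList (ws : List String) (g : String → Int) (a : Int) :
    ((PySem.Set.ofList ws).map g).foldl max a = (ws.map g).foldl max a := by
  induction ws using List.reverseRecOn with
  | nil => rfl
  | append_singleton l w ih =>
      have hofl : PySem.Set.ofList (l ++ [w]) = PySem.Set.add (PySem.Set.ofList l) w := by
        rw [PySem.Set.ofList_append, PySem.Set.update_cons, PySem.Set.update_nil]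
      rw [hofl]
      by_cases hw : w ∈ l
      · have hadd : PySem.Set.add (PySem.Set.ofList l) w = PySem.Set.ofList l := by
          unfold PySem.Set.add
          have : (PySem.Set.ofList l).contains w = true := by
            simp [PySem.Set.contains, hw]
          rw [if_pos this]
        rw [hadd, ih, List.map_append, List.map_singleton, List.foldl_append,
          List.foldl_cons, List.foldl_nil]
        have hle : g w ≤ (l.map g).foldl max a :=
          (PySem.List.le_foldl_max (l.map g) a).2 (g w) (List.mem_map_of_mem hw)
        exact (max_eq_left hle).symm
      · have hadd : PySem.Set.add (PySem.Set.ofList l) w = PySem.Set.ofList l ++ [w] := by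
          unfold PySem.Set.add
          rw [if_neg (by simp [PySem.Set.contains, hw])]
        rw [hadd]
        simp only [List.map_append, List.map_singleton, List.foldl_append,
          List.foldl_cons, List.foldl_nil, ih]

lemma maxD_eq (xs : List Int) (h : ∀ x ∈ xs, 0 ≤ x) :
    PySem.List.maxD xs (fun x => x) 0 = xs.foldl max 0 := by
  cases xs with
  | nil => rfl
  | cons x t =>
      have hx : 0 ≤ x := h x (by simp)
      simp [PySem.List.maxD, PySem.List.max?_id_cons, max_eq_right hx]

lemma foldl_update (l : List String) (s : PySem.Set Char) :
    l.foldl (fun s w => PySem.Set.update s w.toList) s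
    = PySem.Set.update s (l.flatMap String.toList) := by
  induction l generalizing s with
  | nil => simp [PySem.Set.update_nil]
  | cons a t ih =>
      simp only [List.foldl_cons, List.flatMap_cons, PySem.Set.update_append, ih]

lemma A_eq (arr : List String) : miniCharWords arr = pvCanon arr := by
  simp only [miniCharWords]
  rw [store_eq]
  have hkeys : (arr.foldl (fun d i => d.insert i (pvCI i)) PySem.Dict.empty).keys
      = PySem.Set.ofList arr := by
    rw [PySem.Dict.keys_foldl_insert arr (fun _ i => pvCI i) PySem.Dict.empty,
      PySem.Dict.keys_empty]
    exact PySem.Set.update_empty arr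
  rw [hkeys]
  have hcongr : (PySem.Set.ofList arr).foldl (fun counts i =>
        i.toList.foldl (fun counts j =>
          let v := ((arr.foldl (fun d i => d.insert i (pvCI i)) PySem.Dict.empty).getD i
              PySem.Dict.empty).getD j 0
          if counts.contains j = false then
            counts.insert j v
          else
            counts.insert j (max (counts.getD j 0) v))
          counts) PySem.Dict.empty
      = (PySem.Set.ofList arr).foldl (fun c i => pvFoldG (pvCnt i) c i.toList)
          PySem.Dict.empty := by
    apply PySem.List.foldl_congr_mem
    intro acc i hi
    have hiarr : i ∈ arr := (PySem.Set.mem_ofList arr i).mp hi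
    have hD : (arr.foldl (fun d i => d.insert i (pvCI i)) PySem.Dict.empty).getD i
        PySem.Dict.empty = pvCI i := by
      rw [lookup_foldl_insert, if_pos hiarr]
    simp only [hD, pvCI_getD]
    rfl
  rw [hcongr]
  set C := (PySem.Set.ofList arr).foldl (fun c i => pvFoldG (pvCnt i) c i.toList)
    PySem.Dict.empty with hC
  have hCkeys : C.keys = PySem.Set.ofList (arr.flatMap String.toList) := by
    rw [hC, counts_keys, PySem.Dict.keys_empty]
    rw [show PySem.Set.update ([] : PySem.Set Char) ((PySem.Set.ofList arr).flatMap String.toList)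
        = PySem.Set.ofList ((PySem.Set.ofList arr).flatMap String.toList) from
      PySem.Set.update_empty _]
    exact ofList_flatMap_ofList arr
  have hnodup : C.keys.Nodup := by rw [hCkeys]; exact PySem.Set.nodup_ofList _
  have hCgetD : ∀ k, C.getD k 0 = pvMaxOf arr k := by
    intro k
    rw [hC, counts_getD _ _ _ (by rw [PySem.Dict.getD_empty]),
      PySem.Dict.getD_empty, foldl_max_ofList]
    rfl
  have hinner : (fun (out : List String) (p : Char × Int) =>
        (PySem.List.pyRange 0 p.2 1).foldl (fun out _ => out ++ [String.singleton p.1]) out)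
      = fun out p => out ++ (PySem.List.pyRange 0 p.2 1).map (fun _ => String.singleton p.1) := by
    funext out p
    exact PySem.List.foldl_append_singleton_eq_map _ _ _
  rw [hinner, PySem.List.foldl_append_eq_flatMap, List.nil_append,
    PySem.Dict.items_eq_map_keys C hnodup 0, List.flatMap_map, hCkeys]
  unfold pvCanon
  apply List.flatMap_congr
  intro k _
  rw [hCgetD]

lemma B_eq (arr : List String) : miniCharWords_alt arr = pvCanon arr := by
  simp only [miniCharWords_alt]
  have hseen : arr.foldl (fun seen word =>
        word.toList.foldl (fun seen ch => PySem.Set.add seen ch) seen) PySem.Set.empty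
      = PySem.Set.ofList (arr.flatMap String.toList) := by
    have h1 : (fun (seen : PySem.Set Char) (word : String) =>
          word.toList.foldl (fun seen ch => PySem.Set.add seen ch) seen)
        = fun seen word => PySem.Set.update seen word.toList := rfl
    rw [h1, foldl_update, PySem.Set.update_empty]
  rw [hseen]
  unfold pvCanon
  apply List.flatMap_congr
  intro ch _
  have hmax : PySem.List.maxD (arr.map fun word => ((word.toList.count ch : Nat) : Int))
      (fun x => x) 0 = pvMaxOf arr ch := by
    rw [maxD_eq]
    · rfl
    · intro x hx
      obtain ⟨w, _, rfl⟩ := List.mem_map.mp hx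
      exact Int.natCast_nonneg _
  rw [hmax]

-- ===== VERDICT (by name: the statement is the Claim_ definition above) =====
theorem miniCharWords_spec : Claim_equal_miniCharWords := by
  intro arr _
  unfold Spec_miniCharWords
  rw [A_eq, B_eq]
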